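-- pv_equiv track=rewrite | github.com/smallwat3r/aoc-2023 | 1/solver.py | replace_in_line
-- ===== SOURCE A (Python) =====
-- import math
-- from dataclasses import dataclass
--
-- @dataclass
-- class Match:
--     pos: int
--     value: str | None = None
--     value_literal: str | None = None
--
-- numeric_map = (
--     ("one", "1"), ("two", "2"), ("three", "3"),
--     ("four", "4"), ("five", "5"), ("six", "6"),
--     ("seven", "7"), ("eight", "8"), ("nine", "9")
-- )
--
-- def replace_in_line(line: str, reverse: bool = False) -> str:
--     match = Match(math.inf)
--     first_digit_index = math.inf
--     for i, ele in enumerate(line):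
--         if ele.isdigit():
--             first_digit_index = i
--             break
--     for k, v in numeric_map:
--         if reverse:
--             k = k[::-1]
--         i = line.find(k)
--         if i != -1 and i < match.pos and i < first_digit_index:
--             match = Match(i, v, k)
--     if match.value:
--         line = line.replace(match.value_literal, match.value, 1)
--     return line
-- ===== SOURCE B (Python) =====
-- numeric_map = (
--     ("one", "1"), ("two", "2"), ("three", "3"),
--     ("four", "4"), ("five", "5"), ("six", "6"),
--     ("seven", "7"), ("eight", "8"), ("nine", "9")
-- )
--
-- def replace_in_line(line: str, reverse: bool = False) -> str:
--     # single left-to-right scan: stop at the first digit, or splice the digit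
--     # in over the first spelled-out number word encountered before it
--     words = [(k[::-1] if reverse else k, v) for k, v in numeric_map]
--     for i in range(len(line)):
--         if line[i].isdigit():
--             return line
--         for w, v in words:
--             if line.startswith(w, i):
--                 return line[:i] + v + line[i + len(w):]
--     return line
-- ===== Notes on version B (the rewrite author's own statement) =====
-- stated objective: alternative
-- what changed: Replaced the separate first-digit scan plus nine whole-line str.find calls and a str.replace with a single left-to-right scan that stops at the first digit or splices in the digit at the first index where any (possibly reversed) number word starts.
import Mathlib
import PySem

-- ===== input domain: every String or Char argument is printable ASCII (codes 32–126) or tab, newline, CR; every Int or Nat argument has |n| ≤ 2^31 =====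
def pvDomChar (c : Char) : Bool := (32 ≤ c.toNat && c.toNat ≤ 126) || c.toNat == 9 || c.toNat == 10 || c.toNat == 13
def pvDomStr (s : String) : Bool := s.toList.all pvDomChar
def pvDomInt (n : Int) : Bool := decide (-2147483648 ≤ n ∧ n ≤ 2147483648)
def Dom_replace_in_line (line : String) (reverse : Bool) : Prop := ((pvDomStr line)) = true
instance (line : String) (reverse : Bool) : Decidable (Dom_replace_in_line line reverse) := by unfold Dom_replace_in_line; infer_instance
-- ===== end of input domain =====

-- B replaces A's separate first-digit scan, nine whole-line str.find calls and a final
-- str.replace by one left-to-right scan that stops at the first digit or splices the digit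
-- in at the first index where a number word starts (objective: alternative decomposition).

-- ===== PORT A =====

-- the module constant numeric_map, as lists of chars
def pvNumericMap : List (List Char × List Char) :=
  [("one".toList, "1".toList), ("two".toList, "2".toList), ("three".toList, "3".toList),
   ("four".toList, "4".toList), ("five".toList, "5".toList), ("six".toList, "6".toList),
   ("seven".toList, "7".toList), ("eight".toList, "8".toList), ("nine".toList, "9".toList)]

-- A's first loop: 'for i, ele in enumerate(line): if ele.isdigit(): first_digit_index = i; break'
-- (none = math.inf, i.e. no digit found)
def pvFirstDigit : List Char → Nat → Option Nat
  | [], _ => none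
  | c :: cs, i => if PySem.Chars.isdigit c then some i else pvFirstDigit cs (i + 1)

-- 'i < x' where x may be math.inf (none)
def pvLtInf (i : Int) : Option Nat → Bool
  | none => true
  | some f => decide (i < (f : Int))

-- one iteration of A's 'for k, v in numeric_map' loop body (after the optional reversal of k);
-- the running 'match' object is none (= Match(math.inf)) or some (pos, value, value_literal)
def pvStepA (l : List Char) (fd : Option Nat)
    (m : Option (Nat × List Char × List Char)) (k v : List Char) :
    Option (Nat × List Char × List Char) :=
  let i := PySem.Chars.find l k
  if i ≠ -1 ∧ pvLtInf i (m.map Prod.fst) = true ∧ pvLtInf i fd = true then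
    some (i.toNat, v, k)
  else m

def replace_in_line (line : String) (reverse : Bool) : String :=
  let l := line.toList
  let fd := pvFirstDigit l 0
  let m := pvNumericMap.foldl
    (fun m kv =>
      let k := if reverse then kv.1.reverse else kv.1
      pvStepA l fd m k kv.2) none
  match m with
  | none => line      -- match.value is None: falsy, line returned unchanged
  | some (_, v, k) =>
      -- 'line.replace(k, v, 1)' hand-ported: splice v over the FIRST occurrence of k
      -- (exact: PySem.Chars.find points at the first occurrence, -1 = absent → unchanged;
      --  match.value is always a nonempty digit string, truthy exactly when the Option is some)
      let j := PySem.Chars.find l k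
      if j = -1 then line
      else String.ofList (l.take j.toNat ++ v ++ l.drop (j.toNat + k.length))

-- ===== PORT B =====

-- B's inner loop: the first (w, v) in words with line.startswith(w, i), run on the suffix line[i:]
def pvMatchAt (ws : List (List Char × List Char)) (suf : List Char) :
    Option (List Char × List Char) :=
  ws.find? (fun kv => PySem.Chars.startswith suf kv.1)

-- B's outer 'for i in range(len(line))' loop, carried as index i plus the suffix line[i:]
def pvGoB (l : List Char) (ws : List (List Char × List Char)) :
    Nat → List Char → List Char
  | _, [] => l
  | i, c :: rest =>
    if PySem.Chars.isdigit c then l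
    else
      match pvMatchAt ws (c :: rest) with
      | some kv => l.take i ++ kv.2 ++ l.drop (i + kv.1.length)
      | none => pvGoB l ws (i + 1) rest

def replace_in_line_alt (line : String) (reverse : Bool) : String :=
  let l := line.toList
  let ws := pvNumericMap.map (fun kv => ((if reverse then kv.1.reverse else kv.1), kv.2))
  String.ofList (pvGoB l ws 0 l)

-- ===== PRECONDITION & SPEC =====
def Spec_replace_in_line (line : String) (reverse : Bool) (out : String) : Prop := out = replace_in_line_alt line reverse
instance (line : String) (reverse : Bool) (out : String) : Decidable (Spec_replace_in_line line reverse out) := by unfold Spec_replace_in_line; infer_instance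

-- ===== CLAIM (what is proved, stated in full; the proofs are below) =====
def Claim_equal_replace_in_line : Prop := ∀ (line : String) (reverse : Bool), Dom_replace_in_line line reverse → Spec_replace_in_line line reverse (replace_in_line line reverse)

-- ===== LEMMAS AND PROOFS =====

-- ===== LEMMAS AND PROOFS =====

-- A's final 'if match.value: line = line.replace(...)' as a function of the fold state
def pvAOut (line : String) (l : List Char) (m : Option (Nat × List Char × List Char)) : String :=
  match m with
  | none => line
  | some (_, v, k) =>
      let j := PySem.Chars.find l k
      if j = -1 then line
      else String.ofList (l.take j.toNat ++ v ++ l.drop (j.toNat + k.length))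

lemma pvFirstDigit_eq (l : List Char) : ∀ b : Nat,
    pvFirstDigit l b = (l.findIdx? PySem.Chars.isdigit).map (· + b) := by
  induction l with
  | nil => intro b; simp [pvFirstDigit]
  | cons c cs ih =>
      intro b
      by_cases h : PySem.Chars.isdigit c
      · simp [pvFirstDigit, h, List.findIdx?_cons]
      · simp only [pvFirstDigit, List.findIdx?_cons, h, ih]
        cases cs.findIdx? PySem.Chars.isdigit <;> simp <;> omega

-- if nothing at index ≤ j is a digit, the first digit (if any) lies beyond j
lemma pvLtInf_firstDigit (l : List Char) (j : Nat)
    (h : ∀ m : Nat, m ≤ j → ∀ hm : m < l.length, ¬ PySem.Chars.isdigit l[m]) :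
    pvLtInf (j : Int) (pvFirstDigit l 0) = true := by
  rw [pvFirstDigit_eq]
  cases hfd : l.findIdx? PySem.Chars.isdigit with
  | none => simp [pvLtInf]
  | some f =>
      obtain ⟨hf, hdig, -⟩ := List.findIdx?_eq_some_iff_getElem.mp hfd
      simp only [Option.map_some, pvLtInf, decide_eq_true_eq]
      have : ¬ f ≤ j := fun hle => h f hle hf (by simpa using hdig)
      push_cast; omega

-- a digit at index j puts the first digit at some f ≤ j
lemma pvFirstDigit_le (l : List Char) (j : Nat) (hj : j < l.length)
    (hdig : PySem.Chars.isdigit l[j]) :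
    ∃ f, pvFirstDigit l 0 = some f ∧ f ≤ j := by
  rw [pvFirstDigit_eq]
  cases hfd : l.findIdx? PySem.Chars.isdigit with
  | none =>
      rw [List.findIdx?_eq_none_iff] at hfd
      exact absurd (hfd l[j] (l.getElem_mem hj)) (by simp [hdig])
  | some f =>
      obtain ⟨hf, -, hmin⟩ := List.findIdx?_eq_some_iff_getElem.mp hfd
      refine ⟨f, by simp, ?_⟩
      by_contra hlt
      exact hmin j (by omega) (by simpa using hdig)

-- a step that can never fire leaves the fold state unchanged
lemma pvFold_skip (l : List Char) (fd : Option Nat)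
    (ws : List (List Char × List Char)) (m : Option (Nat × List Char × List Char))
    (h : ∀ kv ∈ ws, PySem.Chars.find l kv.1 = -1 ∨
        pvLtInf (PySem.Chars.find l kv.1) (m.map Prod.fst) = false ∨
        pvLtInf (PySem.Chars.find l kv.1) fd = false) :
    ws.foldl (fun m kv => pvStepA l fd m kv.1 kv.2) m = m := by
  induction ws generalizing m with
  | nil => rfl
  | cons kv ws ih =>
      have hkv := h kv (by simp)
      have hstep : pvStepA l fd m kv.1 kv.2 = m := by
        unfold pvStepA
        rcases hkv with h1 | h1 | h1 <;> simp [h1]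
      simp only [List.foldl_cons, hstep]
      exact ih _ (fun kv' hm => h kv' (by simp [hm]))

-- if every word's find is -1 or beyond j, a none-or-beyond-j state stays none-or-beyond-j
lemma pvFold_gt (l : List Char) (fd : Option Nat) (j : Nat)
    (ws : List (List Char × List Char))
    (h : ∀ kv ∈ ws, PySem.Chars.find l kv.1 = -1 ∨ (j : Int) < PySem.Chars.find l kv.1) :
    ∀ m : Option (Nat × List Char × List Char),
      (m = none ∨ ∃ p v k, m = some (p, v, k) ∧ j < p) →
      (ws.foldl (fun m kv => pvStepA l fd m kv.1 kv.2) m) = none ∨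
        ∃ p v k, (ws.foldl (fun m kv => pvStepA l fd m kv.1 kv.2) m) = some (p, v, k) ∧ j < p := by
  induction ws with
  | nil => intro m hm; simpa using hm
  | cons kv ws ih =>
      intro m hm
      simp only [List.foldl_cons]
      apply ih (fun kv' hmem => h kv' (by simp [hmem]))
      by_cases hc : PySem.Chars.find l kv.1 ≠ -1 ∧
          pvLtInf (PySem.Chars.find l kv.1) (Option.map Prod.fst m) = true ∧
          pvLtInf (PySem.Chars.find l kv.1) fd = true
      · have hstep : pvStepA l fd m kv.1 kv.2
            = some ((PySem.Chars.find l kv.1).toNat, kv.2, kv.1) := by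
          simp only [pvStepA, if_pos hc]
        rcases h kv (by simp) with h1 | h1
        · exact absurd h1 hc.1
        · right
          exact ⟨(PySem.Chars.find l kv.1).toNat, kv.2, kv.1, hstep, by omega⟩
      · simp only [pvStepA, if_neg hc]
        exact hm

-- once the state sits at position p and all remaining finds are -1 or ≥ p, it is final
lemma pvFold_keep (l : List Char) (fd : Option Nat) (p : Nat) (v k : List Char)
    (ws : List (List Char × List Char))
    (h : ∀ kv ∈ ws, PySem.Chars.find l kv.1 = -1 ∨ (p : Int) ≤ PySem.Chars.find l kv.1) :
    ws.foldl (fun m kv => pvStepA l fd m kv.1 kv.2) (some (p, v, k)) = some (p, v, k) := by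
  apply pvFold_skip
  intro kv hm
  rcases h kv hm with h1 | h1
  · exact Or.inl h1
  · refine Or.inr (Or.inl ?_)
    have hms : Option.map Prod.fst (some (p, v, k)) = some p := rfl
    rw [hms]
    simp only [pvLtInf, decide_eq_false_iff_not, not_lt]
    exact h1

-- no occurrence before j forces find to be -1 or ≥ j
lemma pvFind_lower (l : List Char) (j : Nat) (k : List Char)
    (hnm : ∀ m : Nat, m < j → ¬ k <+: l.drop m)
    (hne : PySem.Chars.find l k ≠ -1) : (j : Int) ≤ PySem.Chars.find l k := by
  have h0 : 0 ≤ PySem.Chars.find l k := by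
    have := PySem.Chars.neg_one_le_find l k; omega
  obtain ⟨hpre, -⟩ := PySem.Chars.find_spec h0
  by_contra hlt
  have : (PySem.Chars.find l k).toNat < j := by omega
  exact hnm _ this hpre

-- a word that starts at j and nowhere earlier has find exactly j
lemma pvFind_eq (l : List Char) (j : Nat) (k : List Char)
    (hnm : ∀ m : Nat, m < j → ¬ k <+: l.drop m)
    (hpre : k <+: l.drop j) : PySem.Chars.find l k = (j : Int) := by
  have hne : PySem.Chars.find l k ≠ -1 := by
    rw [PySem.Chars.find_ne_neg_one_iff, ← PySem.Chars.isIn_iff_infix,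
      ← PySem.Chars.exists_prefix_drop_iff_isIn]
    exact ⟨j, hpre⟩
  have hge := pvFind_lower l j k hnm hne
  have h0 : 0 ≤ PySem.Chars.find l k := by
    have := PySem.Chars.neg_one_le_find l k; omega
  obtain ⟨-, hmin⟩ := PySem.Chars.find_spec h0
  by_contra hne'
  have : j < (PySem.Chars.find l k).toNat := by omega
  exact hmin j this hpre

-- the main induction: scan position j, suffix line[j:], no digit and no word start before j
lemma pvMain (l : List Char) (ws : List (List Char × List Char))
    (hne : ∀ kv ∈ ws, kv.1 ≠ ([] : List Char)) (line : String)
    (hl : String.ofList l = line) :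
    ∀ (suf : List Char) (j : Nat), suf = l.drop j →
    (∀ m : Nat, m < j → ∀ hm : m < l.length, ¬ PySem.Chars.isdigit l[m]) →
    (∀ m : Nat, m < j → ∀ kv ∈ ws, ¬ kv.1 <+: l.drop m) →
    pvAOut line l (ws.foldl (fun m kv => pvStepA l (pvFirstDigit l 0) m kv.1 kv.2) none)
      = String.ofList (pvGoB l ws j suf) := by
  intro suf
  induction suf with
  | nil =>
      intro j hsuf hdig hnm
      have hjlen : l.length ≤ j := by
        have := congrArg List.length hsuf
        simp at this; omega
      have hfold :
          ws.foldl (fun m kv => pvStepA l (pvFirstDigit l 0) m kv.1 kv.2) none = none := by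
        apply pvFold_skip
        intro kv hmem
        left
        by_contra hfne
        have h0 : 0 ≤ PySem.Chars.find l kv.1 := by
          have := PySem.Chars.neg_one_le_find l kv.1; omega
        obtain ⟨hpre, -⟩ := PySem.Chars.find_spec h0
        have hle : (PySem.Chars.find l kv.1).toNat ≤ l.length := by
          have := PySem.Chars.find_le_length l kv.1; omega
        rcases lt_or_eq_of_le hle with hlt | heq
        · exact hnm _ (by omega) kv hmem hpre
        · rw [heq, List.drop_length, List.prefix_nil] at hpre
          exact hne kv hmem hpre
      rw [hfold]
      simpa [pvAOut, pvGoB] using hl.symm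
  | cons c rest ih =>
      intro j hsuf hdig hnm
      have hhead : l[j]? = some c := by
        rw [← List.head?_drop, ← hsuf]; rfl
      obtain ⟨hjlt, hcj⟩ := List.getElem?_eq_some_iff.mp hhead
      by_cases hd : PySem.Chars.isdigit c
      · -- digit at j: A's fold never fires (fd ≤ j blocks every find ≥ j)
        obtain ⟨f, hfd, hfle⟩ := pvFirstDigit_le l j hjlt (by rw [hcj]; exact hd)
        have hfold :
            ws.foldl (fun m kv => pvStepA l (pvFirstDigit l 0) m kv.1 kv.2) none = none := by
          apply pvFold_skip
          intro kv hmem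
          by_cases hfne : PySem.Chars.find l kv.1 = -1
          · exact Or.inl hfne
          · refine Or.inr (Or.inr ?_)
            have := pvFind_lower l j kv.1 (fun m hm => hnm m hm kv hmem) hfne
            rw [hfd]
            simp only [pvLtInf, decide_eq_false_iff_not, not_lt]
            omega
        rw [hfold]
        simpa [pvAOut, pvGoB, hd] using hl.symm
      · -- no digit at j
        have hdig' : ∀ m : Nat, m ≤ j → ∀ hm : m < l.length, ¬ PySem.Chars.isdigit l[m] := by
          intro m hm hlt
          rcases lt_or_eq_of_le hm with h | h
          · exact hdig m h hlt
          · subst h; rw [hcj]; exact hd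
        cases hm : pvMatchAt ws (c :: rest) with
        | some kv0 =>
            obtain ⟨hp0, ws1, ws2, hdec, hws1⟩ :=
              List.find?_eq_some_iff_append.mp hm
            have hpre0 : kv0.1 <+: l.drop j := by
              rw [← hsuf]; exact (PySem.Chars.startswith_iff _ _).mp hp0
            have hmem0 : kv0 ∈ ws := by rw [hdec]; simp
            have hfind0 : PySem.Chars.find l kv0.1 = (j : Int) :=
              pvFind_eq l j kv0.1 (fun m hm' => hnm m hm' kv0 hmem0) hpre0
            -- fold over ws1 keeps the state none-or-beyond-j
            have h1 : ∀ kv ∈ ws1, PySem.Chars.find l kv.1 = -1 ∨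
                (j : Int) < PySem.Chars.find l kv.1 := by
              intro kv hmem
              by_cases hfne : PySem.Chars.find l kv.1 = -1
              · exact Or.inl hfne
              · right
                have hge := pvFind_lower l j kv.1
                  (fun m hm' => hnm m hm' kv (by rw [hdec]; simp [hmem])) hfne
                rcases lt_or_eq_of_le hge with h | h
                · exact h
                · exfalso
                  have h0 : 0 ≤ PySem.Chars.find l kv.1 := by omega
                  obtain ⟨hpre, -⟩ := PySem.Chars.find_spec h0
                  rw [← h] at hpre
                  simp only [Int.toNat_natCast] at hpre
                  have := hws1 kv hmem
                  rw [Bool.not_eq_eq_eq_not, Bool.not_true] at this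
                  -- this : startswith (c :: rest) kv.1 = false ... need ¬ prefix
                  have : ¬ kv.1 <+: (c :: rest) := by
                    intro hp
                    have := (PySem.Chars.startswith_iff (c :: rest) kv.1).mpr hp
                    simp_all
                  exact this (by rw [hsuf]; exact hpre)
            have hstate := pvFold_gt l (pvFirstDigit l 0) j ws1 h1 none (Or.inl rfl)
            have hltfd : pvLtInf (j : Int) (pvFirstDigit l 0) = true :=
              pvLtInf_firstDigit l j hdig'
            have hj1 : (j : Int) ≠ -1 := by omega
            have hstep0 : pvStepA l (pvFirstDigit l 0)
                (ws1.foldl (fun m kv => pvStepA l (pvFirstDigit l 0) m kv.1 kv.2) none)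
                kv0.1 kv0.2 = some (j, kv0.2, kv0.1) := by
              rcases hstate with h | ⟨p, v, k, h, hjp⟩ <;> rw [h] <;>
                simp only [pvStepA, hfind0, Option.map_some, Option.map_none]
              · rw [if_pos ⟨hj1, rfl, hltfd⟩]
                simp
              · have hlt : pvLtInf (j : Int) (some p) = true := by
                  simp only [pvLtInf, decide_eq_true_eq]
                  exact_mod_cast hjp
                rw [if_pos ⟨hj1, hlt, hltfd⟩]
                simp
            have h2 : ∀ kv ∈ ws2, PySem.Chars.find l kv.1 = -1 ∨
                (j : Int) ≤ PySem.Chars.find l kv.1 := by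
              intro kv hmem
              by_cases hfne : PySem.Chars.find l kv.1 = -1
              · exact Or.inl hfne
              · exact Or.inr (pvFind_lower l j kv.1
                  (fun m hm' => hnm m hm' kv (by rw [hdec]; simp [hmem])) hfne)
            have hfold :
                ws.foldl (fun m kv => pvStepA l (pvFirstDigit l 0) m kv.1 kv.2) none
                  = some (j, kv0.2, kv0.1) := by
              rw [hdec, List.foldl_append]
              simp only [List.foldl_cons]
              rw [hstep0]
              exact pvFold_keep l (pvFirstDigit l 0) j kv0.2 kv0.1 ws2 h2
            rw [hfold]
            simp only [pvAOut, pvGoB, hm, hfind0, if_neg hd]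
            rw [if_neg (by omega)]
            simp
        | none =>
            have hnm' : ∀ m : Nat, m < j + 1 → ∀ kv ∈ ws, ¬ kv.1 <+: l.drop m := by
              intro m hmlt kv hmem
              rcases lt_or_eq_of_le (Nat.lt_succ_iff.mp hmlt) with h | h
              · exact hnm m h kv hmem
              · subst h
                intro hp
                have hfalse := List.find?_eq_none.mp hm kv hmem
                rw [← hsuf] at hp
                exact absurd ((PySem.Chars.startswith_iff _ _).mpr hp) (by simp [hfalse])
            have hrest : rest = l.drop (j + 1) := by
              have : l.drop (j + 1) = (l.drop j).drop 1 := by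
                rw [List.drop_drop]
              rw [this, ← hsuf]; rfl
            have := ih (j + 1) hrest
              (fun m hm' hlt => hdig' m (Nat.lt_succ_iff.mp hm') hlt) hnm'
            rw [this]
            simp [pvGoB, hd, hm]

-- ===== VERDICT (by name: the statement is the Claim_ definition above) =====
theorem replace_in_line_spec : Claim_equal_replace_in_line := by
  intro line reverse _
  unfold Spec_replace_in_line
  have hne : ∀ kv ∈ pvNumericMap.map
      (fun kv => ((if reverse then kv.1.reverse else kv.1), kv.2)),
      kv.1 ≠ ([] : List Char) := by
    cases reverse <;> decide
  have h := pvMain line.toList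
    (pvNumericMap.map (fun kv => ((if reverse then kv.1.reverse else kv.1), kv.2)))
    hne line String.ofList_toList line.toList 0 (by simp)
    (fun m hm => absurd hm (Nat.not_lt_zero m))
    (fun m hm => absurd hm (Nat.not_lt_zero m))
  rw [List.foldl_map] at h
  exact h
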